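-- pv_equiv track=rewrite | github.com/pranavjindal29/Competitive-Coding-Archives-Leetcode | 1573-find-two-non-overlapping-sub-arrays-each-with-target-sum/find-two-non-overlapping-sub-arrays-each-with-target-sum.py | minSumOfLengths
-- ===== SOURCE A (Python) =====
-- from typing import List
--
-- def minSumOfLengths(arr: List[int], target: int) -> int:
--     dp = [float("inf")] * (len(arr) + 1)
--     start, end = 0, 0
--     subarray_sum = 0
--     answer = float("inf")
--     min_length = float("inf")
--     prefix_sum = {0 : -1}
--     while end < len(arr):
--         subarray_sum += arr[end]
--         if subarray_sum - target in prefix_sum: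
--             start = prefix_sum[subarray_sum - target]
--             answer = min(answer, dp[start + 1] + end - start)
--             min_length = min(min_length, end - start)
--         dp[end + 1] = min_length
--         prefix_sum[subarray_sum] = end
--         end += 1
--     return -1 if answer == float("inf") else answer
-- ===== SOURCE B (Python) =====
-- from typing import List
--
-- def _best(a: List[int], target: int) -> List[float]:
--     # best[i] = min length of a subarray with sum == target contained in a[:i]
--     res = [float("inf")]
--     cur = float("inf")
--     psum = 0
--     last = {0: 0}  # prefix-sum value -> latest prefix length having it
--     for i, x in enumerate(a):
--         psum += x
--         if psum - target in last:
--             cur = min(cur, i + 1 - last[psum - target])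
--         last[psum] = i + 1
--         res.append(cur)
--     return res
--
-- def minSumOfLengths(arr: List[int], target: int) -> int:
--     n = len(arr)
--     left = _best(arr, target)
--     right = _best(arr[::-1], target)
--     ans = float("inf")
--     for k in range(n + 1):
--         ans = min(ans, left[k] + right[n - k])
--     return -1 if ans == float("inf") else ans
-- ===== Notes on version B (the rewrite author's own statement) =====
-- stated objective: alternative
-- what changed: A's single interleaved pass (dp side-array of best-so-far lengths updated while scanning) is replaced by a symmetric decomposition: one helper run forward and once on the reversed array builds best-prefix/best-suffix minimum-length tables via prefix-sum hashmaps, combined by a final pass over all split points.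
import Mathlib
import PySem

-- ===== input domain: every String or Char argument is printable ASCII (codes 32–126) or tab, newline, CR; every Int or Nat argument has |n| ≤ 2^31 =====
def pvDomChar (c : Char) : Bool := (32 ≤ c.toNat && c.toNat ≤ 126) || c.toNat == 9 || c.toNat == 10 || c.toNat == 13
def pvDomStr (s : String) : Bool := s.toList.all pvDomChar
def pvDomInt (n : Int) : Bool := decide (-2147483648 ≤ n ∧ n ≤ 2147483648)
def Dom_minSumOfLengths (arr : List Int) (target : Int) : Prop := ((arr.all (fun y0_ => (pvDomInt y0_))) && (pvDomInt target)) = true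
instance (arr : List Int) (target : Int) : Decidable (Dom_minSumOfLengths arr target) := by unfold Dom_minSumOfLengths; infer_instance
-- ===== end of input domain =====

-- B replaces A's single interleaved pass (dp side-array updated while scanning) by two
-- symmetric prefix-sum-hashmap passes (forward, and forward over the reversed array)
-- producing best-prefix/best-suffix tables, combined over all split points; return value only.

-- `none` models Python's float("inf") (all finite values here are ints); min and + on it:
def pvOMin (a b : Option Int) : Option Int :=
  match a, b with
  | none, b => b
  | some x, none => some x
  | some x, some y => some (min x y)

def pvOAdd (a b : Option Int) : Option Int :=
  match a, b with
  | some x, some y => some (x + y)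
  | _, _ => none

-- ===== PORT A =====
-- one iteration of A's while-loop; state = (dp, start, subarray_sum, answer, min_length, prefix_sum)
def pvAStep (arr : List Int) (target : Int)
    (st : List (Option Int) × Int × Int × Option Int × Option Int × PySem.Dict Int Int)
    (e : Nat) : List (Option Int) × Int × Int × Option Int × Option Int × PySem.Dict Int Int :=
  match st with
  | (dp, start, ssum, ans, ml, pm) =>
    let ssum := ssum + PySem.List.pyGetD arr (e : Int) 0      -- arr[end]; end < len(arr), in range
    match pm.get? (ssum - target) with                         -- 'subarray_sum - target in prefix_sum'
    | some s =>
        -- start = prefix_sum[...]; answer = min(answer, dp[start+1] + end - start); min_length = min(min_length, end - start)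
        let ans := pvOMin ans (pvOAdd (PySem.List.pyGetD dp (s + 1) none) (some ((e : Int) - s)))
        let ml := pvOMin ml (some ((e : Int) - s))
        (PySem.List.pySetD dp ((e : Int) + 1) ml, s, ssum, ans, ml, pm.insert ssum (e : Int))
    | none =>
        (PySem.List.pySetD dp ((e : Int) + 1) ml, start, ssum, ans, ml, pm.insert ssum (e : Int))

def minSumOfLengths (arr : List Int) (target : Int) : Int :=
  let n := arr.length
  let st := (List.range n).foldl (pvAStep arr target)
      (List.replicate (n + 1) (none : Option Int), 0, 0, (none : Option Int), (none : Option Int),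
        (PySem.Dict.empty : PySem.Dict Int Int).insert 0 (-1))
  match st.2.2.2.1 with          -- answer
  | none => -1
  | some v => v

-- ===== PORT B =====
-- one iteration of _best's loop; state = (res, cur, psum, last)
def pvBestStep (target : Int)
    (st : List (Option Int) × Option Int × Int × PySem.Dict Int Int)
    (ix : Int × Int) : List (Option Int) × Option Int × Int × PySem.Dict Int Int :=
  match st, ix with
  | (res, cur, psum, last), (i, x) =>
    let psum := psum + x
    let cur := match last.get? (psum - target) with
      | some j => pvOMin cur (some (i + 1 - j))
      | none => cur
    (res ++ [cur], cur, psum, last.insert psum (i + 1))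

def pvBest (a : List Int) (target : Int) : List (Option Int) :=
  ((PySem.List.enumerate a).foldl (pvBestStep target)
      ([none], none, 0, (PySem.Dict.empty : PySem.Dict Int Int).insert 0 0)).1

def minSumOfLengths_alt (arr : List Int) (target : Int) : Int :=
  let n := arr.length
  let left := pvBest arr target
  let right := pvBest arr.reverse target    -- arr[::-1] (PySem.List.slice?_none_none_neg_one)
  let ans := (List.range (n + 1)).foldl
      (fun ans (k : Nat) => pvOMin ans
        (pvOAdd (PySem.List.pyGetD left (k : Int) none)
                (PySem.List.pyGetD right ((n : Int) - (k : Int)) none))) none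
  match ans with
  | none => -1
  | some v => v

-- ===== PRECONDITION & SPEC =====
def Spec_minSumOfLengths (arr : List Int) (target : Int) (out : Int) : Prop := out = minSumOfLengths_alt arr target
instance (arr : List Int) (target : Int) (out : Int) : Decidable (Spec_minSumOfLengths arr target out) := by unfold Spec_minSumOfLengths; infer_instance

-- ===== CLAIM (what is proved, stated in full; the proofs are below) =====
def Claim_equal_minSumOfLengths : Prop := ∀ (arr : List Int) (target : Int), Dom_minSumOfLengths arr target → Spec_minSumOfLengths arr target (minSumOfLengths arr target)

-- ===== LEMMAS AND PROOFS =====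

-- ---------- order/min algebra on Option Int (none = +inf) ----------
def pvOLe (a b : Option Int) : Prop :=
  match a, b with
  | _, none => True
  | none, some _ => False
  | some x, some y => x ≤ y

theorem pvOLe_refl (a : Option Int) : pvOLe a a := by cases a <;> simp [pvOLe]

theorem pvOLe_trans {a b c : Option Int} (h1 : pvOLe a b) (h2 : pvOLe b c) : pvOLe a c := by
  cases a <;> cases b <;> cases c <;> simp_all [pvOLe] <;> omega

theorem pvOLe_antisymm {a b : Option Int} (h1 : pvOLe a b) (h2 : pvOLe b a) : a = b := by
  cases a <;> cases b <;> simp_all [pvOLe] <;> omega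

theorem pvOLe_none (a : Option Int) : pvOLe a none := by cases a <;> simp [pvOLe]

theorem pvOMin_none_right (a : Option Int) : pvOMin a none = a := by cases a <;> rfl

theorem pvOMin_assoc (a b c : Option Int) : pvOMin (pvOMin a b) c = pvOMin a (pvOMin b c) := by
  cases a <;> cases b <;> cases c <;> simp [pvOMin, min_assoc]

theorem pvOMin_le_left (a b : Option Int) : pvOLe (pvOMin a b) a := by
  cases a <;> cases b <;> simp [pvOMin, pvOLe, min_le_left]

theorem pvOMin_le_right (a b : Option Int) : pvOLe (pvOMin a b) b := by
  cases a <;> cases b <;> simp [pvOMin, pvOLe, min_le_right]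

theorem pvLe_oMin {a b c : Option Int} (h1 : pvOLe c a) (h2 : pvOLe c b) : pvOLe c (pvOMin a b) := by
  cases a <;> cases b <;> cases c <;> simp_all [pvOMin, pvOLe] <;> omega

theorem pvOAdd_mono {a b c d : Option Int} (h1 : pvOLe a b) (h2 : pvOLe c d) :
    pvOLe (pvOAdd a c) (pvOAdd b d) := by
  cases a <;> cases b <;> cases c <;> cases d <;> simp_all [pvOAdd, pvOLe] <;> omega

-- ---------- fold-min over a list of Option Int ----------
def pvOFmin (l : List (Option Int)) : Option Int := l.foldl pvOMin none

theorem pvFoldl_oMin (l : List (Option Int)) (a : Option Int) :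
    l.foldl pvOMin a = pvOMin a (pvOFmin l) := by
  induction l generalizing a with
  | nil => simp [pvOFmin, pvOMin_none_right]
  | cons x xs ih =>
      simp only [pvOFmin, List.foldl_cons] at *
      rw [ih (pvOMin a x), ih (pvOMin none x), pvOMin_assoc]
      cases x <;> simp [pvOMin]

theorem pvOMin_none_left (b : Option Int) : pvOMin none b = b := rfl

theorem pvOFmin_cons (x : Option Int) (l : List (Option Int)) :
    pvOFmin (x :: l) = pvOMin x (pvOFmin l) := by
  simp only [pvOFmin, List.foldl_cons, pvOMin_none_left]
  exact pvFoldl_oMin l x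

theorem pvOFmin_append (l1 l2 : List (Option Int)) :
    pvOFmin (l1 ++ l2) = pvOMin (pvOFmin l1) (pvOFmin l2) := by
  simp only [pvOFmin, List.foldl_append]
  rw [pvFoldl_oMin l2 (List.foldl pvOMin none l1)]
  rfl

theorem pvOFmin_le_mem {l : List (Option Int)} {x : Option Int} (h : x ∈ l) :
    pvOLe (pvOFmin l) x := by
  induction l with
  | nil => cases h
  | cons y ys ih =>
      rw [pvOFmin_cons]
      rcases List.mem_cons.1 h with rfl | h'
      · exact pvOMin_le_left _ _
      · exact pvOLe_trans (pvOMin_le_right _ _) (ih h')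

theorem pvLe_oFmin {l : List (Option Int)} {a : Option Int} (h : ∀ x ∈ l, pvOLe a x) :
    pvOLe a (pvOFmin l) := by
  induction l with
  | nil => exact pvOLe_none a
  | cons y ys ih =>
      rw [pvOFmin_cons]
      exact pvLe_oMin (h y (List.mem_cons_self)) (ih fun x hx => h x (List.mem_cons_of_mem _ hx))

theorem pvOFmin_eq_of_subset {l1 l2 : List (Option Int)} (h1 : ∀ x ∈ l1, x ∈ l2)
    (h2 : ∀ x ∈ l2, x ∈ l1) : pvOFmin l1 = pvOFmin l2 :=
  pvOLe_antisymm (pvLe_oFmin fun x hx => pvOFmin_le_mem (h2 x hx))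
    (pvLe_oFmin fun x hx => pvOFmin_le_mem (h1 x hx))

theorem pvOFmin_mem {l : List (Option Int)} {a : Int} (h : pvOFmin l = some a) : some a ∈ l := by
  induction l with
  | nil => simp [pvOFmin] at h
  | cons y ys ih =>
      rw [pvOFmin_cons] at h
      cases hy : y with
      | none =>
          subst hy; simp [pvOMin] at h
          exact List.mem_cons_of_mem _ (ih h)
      | some b =>
          subst hy
          cases hys : pvOFmin ys with
          | none => rw [hys, pvOMin_none_right] at h; exact List.mem_cons.2 (Or.inl h.symm)
          | some c =>
              rw [hys] at h
              simp [pvOMin] at h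
              rcases min_cases b c with ⟨hm, _⟩ | ⟨hm, _⟩
              · rw [hm] at h; exact List.mem_cons.2 (Or.inl (by rw [h]))
              · rw [hm] at h; subst h; exact List.mem_cons_of_mem _ (ih hys)

-- ---------- prefix sums, last matching prefix, candidate lists ----------
def pvPfx (arr : List Int) (i : Nat) : Int := (arr.take i).sum

-- latest j < m with pvPfx arr j = v
def pvLast (arr : List Int) (v : Int) (m : Nat) : Option Nat :=
  (List.range m).foldl (fun acc i => if pvPfx arr i = v then some i else acc) none

-- lengths of all target subarrays (s, e) with s < e ≤ k
def pvCand (arr : List Int) (target : Int) (k : Nat) : List (Option Int) :=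
  (List.range (k + 1)).flatMap (fun e =>
    ((List.range e).filter (fun s => pvPfx arr e - pvPfx arr s == target)).map
      (fun (s : Nat) => some ((e : Int) - (s : Int))))

def pvML (arr : List Int) (target : Int) (k : Nat) : Option Int := pvOFmin (pvCand arr target k)

-- lengths of target subarrays ending exactly at e
def pvSlice (arr : List Int) (target : Int) (e : Nat) : Option Int :=
  pvOFmin (((List.range e).filter (fun s => pvPfx arr e - pvPfx arr s == target)).map
    (fun (s : Nat) => some ((e : Int) - (s : Int))))

def pvTerm (arr : List Int) (target : Int) (e : Nat) : Option Int :=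
  match pvLast arr (pvPfx arr e - target) e with
  | none => none
  | some s => pvOAdd (pvML arr target s) (some ((e : Int) - (s : Int)))

def pvAN (arr : List Int) (target : Int) (k : Nat) : Option Int :=
  pvOFmin ((List.range k).map (fun j => pvTerm arr target (j + 1)))

def pvOptList (arr : List Int) (target : Int) : List (Option Int) :=
  (List.range (arr.length + 1)).flatMap (fun e =>
    ((List.range e).filter (fun s => pvPfx arr e - pvPfx arr s == target)).map
      (fun (s : Nat) => pvOAdd (pvML arr target s) (some ((e : Int) - (s : Int)))))

def pvOPT (arr : List Int) (target : Int) : Option Int := pvOFmin (pvOptList arr target)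

-- target subarrays (s, e) with t ≤ s < e ≤ n
def pvSufCand (arr : List Int) (target : Int) (t : Nat) : List (Option Int) :=
  (List.range (arr.length + 1)).flatMap (fun e =>
    ((List.range e).filter (fun s => (pvPfx arr e - pvPfx arr s == target) && decide (t ≤ s))).map
      (fun (s : Nat) => some ((e : Int) - (s : Int))))

def pvSuf (arr : List Int) (target : Int) (t : Nat) : Option Int := pvOFmin (pvSufCand arr target t)

theorem pvPfx_succ (arr : List Int) (k : Nat) (h : k < arr.length) :
    pvPfx arr (k + 1) = pvPfx arr k + arr.getD k 0 := by
  unfold pvPfx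
  rw [List.take_succ, List.sum_append, List.getElem?_eq_getElem h]
  simp [List.getD_eq_getElem?_getD, List.getElem?_eq_getElem h]

theorem pvLast_succ (arr : List Int) (v : Int) (m : Nat) :
    pvLast arr v (m + 1) = if pvPfx arr m = v then some m else pvLast arr v m := by
  simp [pvLast, List.range_succ]

theorem pvLast_lt {arr : List Int} {v : Int} {m : Nat} {i : Nat} (h : pvLast arr v m = some i) :
    i < m ∧ pvPfx arr i = v := by
  induction m with
  | zero => simp [pvLast] at h
  | succ m ih =>
      rw [pvLast_succ] at h
      split at h
      · rename_i hp; cases h; exact ⟨Nat.lt_succ_self _, hp⟩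
      · rcases ih h with ⟨h1, h2⟩; exact ⟨by omega, h2⟩

theorem pvLast_exists {arr : List Int} {v : Int} {m i : Nat} (hi : i < m) (hp : pvPfx arr i = v) :
    ∃ j, pvLast arr v m = some j ∧ i ≤ j ∧ j < m := by
  induction m with
  | zero => omega
  | succ m ih =>
      rw [pvLast_succ]
      by_cases hm : pvPfx arr m = v
      · exact ⟨m, by simp [hm], by omega, by omega⟩
      · have hi' : i < m := by
          rcases Nat.lt_succ_iff_lt_or_eq.1 hi with h | rfl
          · exact h
          · exact absurd hp hm
        rcases ih hi' with ⟨j, hj, hij, hjm⟩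
        exact ⟨j, by simp [hm, hj], hij, by omega⟩

theorem pvOFmin_singleton (x : Option Int) : pvOFmin [x] = x := by
  rw [pvOFmin_cons]; simp [pvOFmin, pvOMin_none_right]

theorem pvSlice_aux (arr : List Int) (target : Int) (e : Nat) (m : Nat) :
    pvOFmin (((List.range m).filter (fun s => pvPfx arr e - pvPfx arr s == target)).map
      (fun (s : Nat) => some ((e : Int) - (s : Int)))) =
    (pvLast arr (pvPfx arr e - target) m).map (fun (i : Nat) => (e : Int) - (i : Int)) := by
  induction m with
  | zero => simp [pvOFmin, pvLast]
  | succ m ih =>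
      rw [List.range_succ, List.filter_append, List.map_append, pvOFmin_append, ih, pvLast_succ]
      by_cases hm : pvPfx arr m = pvPfx arr e - target
      · have hb : (pvPfx arr e - pvPfx arr m == target) = true := by
          simp [beq_iff_eq]; omega
        rw [if_pos hm]
        simp only [List.filter_cons, hb, if_true, List.filter_nil, List.map_cons,
          List.map_nil, pvOFmin_singleton, Option.map_some]
        cases hl : pvLast arr (pvPfx arr e - target) m with
        | none => simp [pvOMin]
        | some i =>
            have hi := (pvLast_lt hl).1
            simp only [Option.map_some, pvOMin]
            have : min ((e : Int) - (i : Int)) ((e : Int) - (m : Int)) = (e : Int) - (m : Int) := by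
              omega
            rw [this]
      · have hb : (pvPfx arr e - pvPfx arr m == target) = false := by
          simp [beq_iff_eq]; omega
        rw [if_neg hm]
        simp only [List.filter_cons, hb, if_false, List.filter_nil, List.map_nil,
          List.append_nil, pvOFmin, List.foldl_nil]
        exact pvOMin_none_right _

theorem pvSlice_eq (arr : List Int) (target : Int) (e : Nat) :
    pvSlice arr target e = (pvLast arr (pvPfx arr e - target) e).map (fun (i : Nat) => (e : Int) - (i : Int)) :=
  pvSlice_aux arr target e e

theorem pvML_zero (arr : List Int) (target : Int) : pvML arr target 0 = none := rfl

theorem pvCand_succ (arr : List Int) (target : Int) (k : Nat) :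
    pvCand arr target (k + 1) = pvCand arr target k ++
      ((List.range (k + 1)).filter (fun s => pvPfx arr (k + 1) - pvPfx arr s == target)).map
        (fun (s : Nat) => some (((k + 1 : Nat) : Int) - (s : Int))) := by
  unfold pvCand
  rw [List.range_succ, List.flatMap_append]
  simp

theorem pvML_succ (arr : List Int) (target : Int) (k : Nat) :
    pvML arr target (k + 1) = pvOMin (pvML arr target k) (pvSlice arr target (k + 1)) := by
  unfold pvML pvSlice
  rw [pvCand_succ, pvOFmin_append]

theorem pvMem_cand {x : Option Int} {arr : List Int} {target : Int} {k : Nat} :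
    x ∈ pvCand arr target k ↔ ∃ s e : Nat, s < e ∧ e ≤ k ∧
      pvPfx arr e - pvPfx arr s = target ∧ x = some ((e : Int) - (s : Int)) := by
  simp only [pvCand, List.mem_flatMap, List.mem_map, List.mem_filter, List.mem_range,
    beq_iff_eq]
  constructor
  · rintro ⟨e, he, s, ⟨hs, hc⟩, rfl⟩
    exact ⟨s, e, hs, by omega, hc, rfl⟩
  · rintro ⟨s, e, hs, he, hc, rfl⟩
    exact ⟨e, by omega, s, ⟨hs, hc⟩, rfl⟩

theorem pvMem_optList {x : Option Int} {arr : List Int} {target : Int} :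
    x ∈ pvOptList arr target ↔ ∃ s e : Nat, s < e ∧ e ≤ arr.length ∧
      pvPfx arr e - pvPfx arr s = target ∧
      x = pvOAdd (pvML arr target s) (some ((e : Int) - (s : Int))) := by
  simp only [pvOptList, List.mem_flatMap, List.mem_map, List.mem_filter, List.mem_range,
    beq_iff_eq]
  constructor
  · rintro ⟨e, he, s, ⟨hs, hc⟩, rfl⟩
    exact ⟨s, e, hs, by omega, hc, rfl⟩
  · rintro ⟨s, e, hs, he, hc, rfl⟩
    exact ⟨e, by omega, s, ⟨hs, hc⟩, rfl⟩

theorem pvMem_sufCand {x : Option Int} {arr : List Int} {target : Int} {t : Nat} :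
    x ∈ pvSufCand arr target t ↔ ∃ s e : Nat, s < e ∧ e ≤ arr.length ∧ t ≤ s ∧
      pvPfx arr e - pvPfx arr s = target ∧ x = some ((e : Int) - (s : Int)) := by
  simp only [pvSufCand, List.mem_flatMap, List.mem_map, List.mem_filter, List.mem_range,
    Bool.and_eq_true, beq_iff_eq, decide_eq_true_eq]
  constructor
  · rintro ⟨e, he, s, ⟨hs, hc, ht⟩, rfl⟩
    exact ⟨s, e, hs, by omega, ht, hc, rfl⟩
  · rintro ⟨s, e, hs, he, ht, hc, rfl⟩
    exact ⟨e, by omega, s, ⟨hs, hc, ht⟩, rfl⟩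

theorem pvML_antitone {arr : List Int} {target : Int} {j k : Nat} (h : j ≤ k) :
    pvOLe (pvML arr target k) (pvML arr target j) :=
  pvLe_oFmin fun x hx => by
    rcases pvMem_cand.1 hx with ⟨s, e, hs, he, hc, rfl⟩
    exact pvOFmin_le_mem (pvMem_cand.2 ⟨s, e, hs, by omega, hc, rfl⟩)

theorem pvAN_succ (arr : List Int) (target : Int) (k : Nat) :
    pvAN arr target (k + 1) = pvOMin (pvAN arr target k) (pvTerm arr target (k + 1)) := by
  unfold pvAN
  rw [List.range_succ, List.map_append, pvOFmin_append]
  simp [pvOFmin_singleton]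

-- ---------- the invariant of A's loop ----------
def pvInvA (arr : List Int) (target : Int) (k : Nat)
    (st : List (Option Int) × Int × Int × Option Int × Option Int × PySem.Dict Int Int) : Prop :=
  st.1.length = arr.length + 1 ∧
  (∀ i : Nat, (h : i < st.1.length) → st.1[i] = (if i ≤ k then pvML arr target i else none)) ∧
  st.2.2.1 = pvPfx arr k ∧
  st.2.2.2.1 = pvAN arr target k ∧
  st.2.2.2.2.1 = pvML arr target k ∧
  (∀ v : Int, st.2.2.2.2.2.get? v = (pvLast arr v (k + 1)).map (fun (i : Nat) => (i : Int) - 1))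

theorem pvInvA_init (arr : List Int) (target : Int) :
    pvInvA arr target 0 (List.replicate (arr.length + 1) (none : Option Int), 0, 0, none, none,
      (PySem.Dict.empty : PySem.Dict Int Int).insert 0 (-1)) := by
  refine ⟨by simp, ?_, rfl, rfl, rfl, ?_⟩
  · intro i h
    rw [List.getElem_replicate]
    split
    · rename_i hi
      have : i = 0 := by omega
      subst this
      rfl
    · rfl
  · intro v
    rw [PySem.Dict.get?_insert, pvLast_succ]
    have h0 : pvPfx arr 0 = (0 : Int) := rfl
    rw [h0]
    by_cases hv : v = 0
    · subst hv; simp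
    · simp [hv, Ne.symm hv, PySem.Dict.get?_empty, pvLast]

theorem pvAStep_inv {arr : List Int} {target : Int} {k : Nat} (hk : k < arr.length)
    {st : List (Option Int) × Int × Int × Option Int × Option Int × PySem.Dict Int Int}
    (h : pvInvA arr target k st) :
    pvInvA arr target (k + 1) (pvAStep arr target st k) := by
  obtain ⟨dp, start, ssum, ans, ml, pm⟩ := st
  obtain ⟨hlen, hdp, hssum, hans, hml, hpm⟩ := h
  simp only at hlen hdp hssum hans hml hpm
  subst hssum hans hml
  have hs' : pvPfx arr k + PySem.List.pyGetD arr (k : Int) 0 = pvPfx arr (k + 1) := by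
    rw [PySem.List.pyGetD_natCast, ← pvPfx_succ arr k hk]
  have hget : pm.get? (pvPfx arr (k + 1) - target) =
      (pvLast arr (pvPfx arr (k + 1) - target) (k + 1)).map (fun (i : Nat) => (i : Int) - 1) :=
    hpm _
  have hsetIdx : ((k : Int) + 1) = ((k + 1 : Nat) : Int) := by push_cast; ring
  have hML : pvML arr target (k + 1) = pvOMin (pvML arr target k)
      ((pvLast arr (pvPfx arr (k + 1) - target) (k + 1)).map
        (fun (i : Nat) => ((k + 1 : Nat) : Int) - (i : Int))) := by
    rw [pvML_succ, ← pvSlice_eq]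
  have hAN : pvAN arr target (k + 1) = pvOMin (pvAN arr target k) (pvTerm arr target (k + 1)) :=
    pvAN_succ arr target k
  cases hgl : pvLast arr (pvPfx arr (k + 1) - target) (k + 1) with
  | none =>
      have hstep : pvAStep arr target (dp, start, pvPfx arr k, pvAN arr target k,
          pvML arr target k, pm) k =
          (PySem.List.pySetD dp ((k : Int) + 1) (pvML arr target k), start, pvPfx arr (k + 1),
            pvAN arr target k, pvML arr target k, pm.insert (pvPfx arr (k + 1)) (k : Int)) := by
        simp only [pvAStep, hs', hget, hgl, Option.map_none]
      rw [hstep]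
      have hml1 : pvML arr target (k + 1) = pvML arr target k := by
        rw [hML, hgl]; exact pvOMin_none_right _
      have han1 : pvAN arr target (k + 1) = pvAN arr target k := by
        rw [hAN, pvTerm, hgl]; exact pvOMin_none_right _
      refine ⟨?_, ?_, rfl, han1.symm, hml1.symm, ?_⟩
      · simp only [hsetIdx, PySem.List.pySetD_natCast, List.length_set]; exact hlen
      · intro i hi
        simp only [hsetIdx, PySem.List.pySetD_natCast, List.length_set] at hi ⊢
        rw [List.getElem_set]
        split
        · rename_i hik
          subst hik
          rw [if_pos (by omega), hml1]
        · rename_i hik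
          rw [hdp i hi]
          by_cases h1 : i ≤ k
          · rw [if_pos h1, if_pos (by omega)]
          · rw [if_neg h1, if_neg (by omega)]
      · intro v
        rw [PySem.Dict.get?_insert, pvLast_succ]
        by_cases hv : v = pvPfx arr (k + 1)
        · subst hv; simp
        · rw [if_neg hv, if_neg (fun hh => hv hh.symm), hpm]
  | some i =>
      obtain ⟨hik, hpi⟩ := pvLast_lt hgl
      have hstep : pvAStep arr target (dp, start, pvPfx arr k, pvAN arr target k,
          pvML arr target k, pm) k =
          (PySem.List.pySetD dp ((k : Int) + 1)
              (pvOMin (pvML arr target k) (some ((k : Int) - ((i : Int) - 1)))),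
            (i : Int) - 1, pvPfx arr (k + 1),
            pvOMin (pvAN arr target k)
              (pvOAdd (PySem.List.pyGetD dp (((i : Int) - 1) + 1) none)
                (some ((k : Int) - ((i : Int) - 1)))),
            pvOMin (pvML arr target k) (some ((k : Int) - ((i : Int) - 1))),
            pm.insert (pvPfx arr (k + 1)) (k : Int)) := by
        simp only [pvAStep, hs', hget, hgl, Option.map_some]
      rw [hstep]
      have hdpi : PySem.List.pyGetD dp (((i : Int) - 1) + 1) none = pvML arr target i := by
        have : ((i : Int) - 1) + 1 = ((i : Nat) : Int) := by ring
        rw [this, PySem.List.pyGetD_natCast]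
        have hilen : i < dp.length := by omega
        rw [List.getD_eq_getElem?_getD, List.getElem?_eq_getElem hilen]
        simp only [Option.getD_some]
        rw [hdp i hilen, if_pos (by omega)]
      have hlenv : (k : Int) - ((i : Int) - 1) = ((k + 1 : Nat) : Int) - (i : Int) := by
        push_cast; ring
      have hml1 : pvML arr target (k + 1) =
          pvOMin (pvML arr target k) (some ((k : Int) - ((i : Int) - 1))) := by
        rw [hML, hgl, Option.map_some, hlenv]
      have han1 : pvAN arr target (k + 1) =
          pvOMin (pvAN arr target k)
            (pvOAdd (PySem.List.pyGetD dp (((i : Int) - 1) + 1) none)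
              (some ((k : Int) - ((i : Int) - 1)))) := by
        rw [hAN, pvTerm, hgl, hdpi, hlenv]
      refine ⟨?_, ?_, rfl, han1.symm, hml1.symm, ?_⟩
      · simp only [hsetIdx, PySem.List.pySetD_natCast, List.length_set]; exact hlen
      · intro j hj
        simp only [hsetIdx, PySem.List.pySetD_natCast, List.length_set] at hj ⊢
        rw [List.getElem_set]
        split
        · rename_i hjk
          subst hjk
          rw [if_pos (by omega), hml1]
        · rename_i hjk
          rw [hdp j hj]
          by_cases h1 : j ≤ k
          · rw [if_pos h1, if_pos (by omega)]
          · rw [if_neg h1, if_neg (by omega)]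
      · intro v
        rw [PySem.Dict.get?_insert, pvLast_succ]
        by_cases hv : v = pvPfx arr (k + 1)
        · subst hv; simp
        · rw [if_neg hv, if_neg (fun hh => hv hh.symm), hpm]

theorem pvInvA_fold (arr : List Int) (target : Int) :
    ∀ m, m ≤ arr.length →
      pvInvA arr target m ((List.range m).foldl (pvAStep arr target)
        (List.replicate (arr.length + 1) (none : Option Int), 0, 0, none, none,
          (PySem.Dict.empty : PySem.Dict Int Int).insert 0 (-1))) := by
  intro m
  induction m with
  | zero => intro _; exact pvInvA_init arr target
  | succ m ih =>
      intro hm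
      rw [List.range_succ, List.foldl_append, List.foldl_cons, List.foldl_nil]
      exact pvAStep_inv (by omega) (ih (by omega))

theorem pvA_eq_AN (arr : List Int) (target : Int) :
    minSumOfLengths arr target =
      (match pvAN arr target arr.length with
       | none => -1
       | some v => v) := by
  have h := (pvInvA_fold arr target arr.length (le_refl _)).2.2.2.1
  simp only at h
  rw [show minSumOfLengths arr target =
      (match ((List.range arr.length).foldl (pvAStep arr target)
          (List.replicate (arr.length + 1) (none : Option Int), 0, 0, none, none,
            (PySem.Dict.empty : PySem.Dict Int Int).insert 0 (-1))).2.2.2.1 with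
       | none => (-1 : Int)
       | some v => v) from rfl, h]

-- ---------- A's answer is the optimum over all pairs (first part inside pvML) ----------
theorem pvAN_eq_OPT (arr : List Int) (target : Int) :
    pvAN arr target arr.length = pvOPT arr target := by
  unfold pvAN pvOPT
  apply pvOLe_antisymm
  · apply pvLe_oFmin
    intro x hx
    rcases pvMem_optList.1 hx with ⟨s, e, hs, he, hc, rfl⟩
    have he1 : 1 ≤ e := by omega
    have hmem : pvTerm arr target e ∈
        (List.range arr.length).map (fun j => pvTerm arr target (j + 1)) :=
      List.mem_map.2 ⟨e - 1, List.mem_range.2 (by omega), by rw [Nat.sub_add_cancel he1]⟩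
    refine pvOLe_trans (pvOFmin_le_mem hmem) ?_
    have hps : pvPfx arr s = pvPfx arr e - target := by omega
    rcases pvLast_exists (show s < e by omega) hps with ⟨j, hj, hsj, hje⟩
    rw [pvTerm, hj]
    refine pvOAdd_mono (pvML_antitone hsj) ?_
    simp only [pvOLe]
    omega
  · apply pvLe_oFmin
    intro x hx
    rcases List.mem_map.1 hx with ⟨j, hjm, rfl⟩
    rw [pvTerm]
    cases hl : pvLast arr (pvPfx arr (j + 1) - target) (j + 1) with
    | none => exact pvOLe_none _
    | some i =>
        obtain ⟨hij, hpi⟩ := pvLast_lt hl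
        exact pvOFmin_le_mem (pvMem_optList.2
          ⟨i, j + 1, by omega, by have := List.mem_range.1 hjm; omega, by omega, rfl⟩)

-- ---------- the invariant of B's _best loop ----------
def pvInvB (a : List Int) (target : Int) (k : Nat)
    (st : List (Option Int) × Option Int × Int × PySem.Dict Int Int) : Prop :=
  st.1 = (List.range (k + 1)).map (fun i => pvML a target i) ∧
  st.2.1 = pvML a target k ∧
  st.2.2.1 = pvPfx a k ∧
  (∀ v : Int, st.2.2.2.get? v = (pvLast a v (k + 1)).map (fun (i : Nat) => (i : Int)))

theorem pvInvB_init (a : List Int) (target : Int) :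
    pvInvB a target 0 ([none], none, 0,
      (PySem.Dict.empty : PySem.Dict Int Int).insert 0 0) := by
  refine ⟨by simp [List.range_succ, pvML_zero], rfl, rfl, ?_⟩
  intro v
  rw [PySem.Dict.get?_insert, pvLast_succ]
  have h0 : pvPfx a 0 = (0 : Int) := rfl
  rw [h0]
  by_cases hv : v = 0
  · subst hv; simp
  · simp [hv, Ne.symm hv, PySem.Dict.get?_empty, pvLast]

theorem pvBestStep_inv {a : List Int} {target : Int} {k : Nat} (hk : k < a.length)
    {st : List (Option Int) × Option Int × Int × PySem.Dict Int Int}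
    (h : pvInvB a target k st) :
    pvInvB a target (k + 1) (pvBestStep target st ((k : Int), PySem.List.pyGetD a (k : Int) 0)) := by
  obtain ⟨res, cur, psum, last⟩ := st
  obtain ⟨hres, hcur, hpsum, hlast⟩ := h
  simp only at hres hcur hpsum hlast
  subst hres hcur hpsum
  have hs' : pvPfx a k + PySem.List.pyGetD a (k : Int) 0 = pvPfx a (k + 1) := by
    rw [PySem.List.pyGetD_natCast, ← pvPfx_succ a k hk]
  have hget : last.get? (pvPfx a (k + 1) - target) =
      (pvLast a (pvPfx a (k + 1) - target) (k + 1)).map (fun (i : Nat) => (i : Int)) :=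
    hlast _
  have hML : pvML a target (k + 1) = pvOMin (pvML a target k)
      ((pvLast a (pvPfx a (k + 1) - target) (k + 1)).map
        (fun (i : Nat) => ((k + 1 : Nat) : Int) - (i : Int))) := by
    rw [pvML_succ, ← pvSlice_eq]
  have hcur' : (match last.get? (pvPfx a (k + 1) - target) with
      | some j => pvOMin (pvML a target k) (some ((k : Int) + 1 - j))
      | none => pvML a target k) = pvML a target (k + 1) := by
    rw [hget]
    cases hgl : pvLast a (pvPfx a (k + 1) - target) (k + 1) with
    | none =>
        rw [hML, hgl]
        simp [pvOMin_none_right]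
    | some i =>
        rw [hML, hgl]
        simp only [Option.map_some]
        have : ((k : Int) + 1 - (i : Int)) = (((k + 1 : Nat) : Int) - (i : Int)) := by
          push_cast; ring
        rw [this]
  have hstep : pvBestStep target ((List.range (k + 1)).map (fun i => pvML a target i),
      pvML a target k, pvPfx a k, last) ((k : Int), PySem.List.pyGetD a (k : Int) 0) =
      ((List.range (k + 1)).map (fun i => pvML a target i) ++ [pvML a target (k + 1)],
        pvML a target (k + 1), pvPfx a (k + 1),
        last.insert (pvPfx a (k + 1)) ((k : Int) + 1)) := by
    simp only [pvBestStep, hs', hcur']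
  rw [hstep]
  refine ⟨by simp [List.range_succ], rfl, rfl, ?_⟩
  intro v
  rw [PySem.Dict.get?_insert, pvLast_succ]
  by_cases hv : v = pvPfx a (k + 1)
  · subst hv; simp
  · rw [if_neg hv, if_neg (fun hh => hv hh.symm), hlast]

theorem pvInvB_fold (a : List Int) (target : Int) :
    ∀ m, m ≤ a.length →
      pvInvB a target m ((List.range m).foldl
        (fun st (j : Nat) => pvBestStep target st ((j : Int), PySem.List.pyGetD a (j : Int) 0))
        ([none], none, 0, (PySem.Dict.empty : PySem.Dict Int Int).insert 0 0)) := by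
  intro m
  induction m with
  | zero => intro _; exact pvInvB_init a target
  | succ m ih =>
      intro hm
      rw [List.range_succ, List.foldl_append, List.foldl_cons, List.foldl_nil]
      exact pvBestStep_inv (by omega) (ih (by omega))

theorem pvBest_eq (a : List Int) (target : Int) :
    pvBest a target = (List.range (a.length + 1)).map (fun i => pvML a target i) := by
  unfold pvBest
  rw [PySem.List.enumerate_eq_map_pyRange a 0, PySem.List.len_eq,
    PySem.List.pyRange_zero_natCast, List.map_map, List.foldl_map]
  exact (pvInvB_fold a target a.length (le_refl _)).1

-- ---------- the reversed pass computes suffix minima ----------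
theorem pvPfx_reverse (arr : List Int) (j : Nat) (hj : j ≤ arr.length) :
    pvPfx arr.reverse j = pvPfx arr arr.length - pvPfx arr (arr.length - j) := by
  unfold pvPfx
  rw [List.take_reverse, List.sum_reverse_int, List.take_length]
  have := List.sum_take_add_sum_drop arr (arr.length - j)
  omega

theorem pvML_reverse (arr : List Int) (target : Int) (m : Nat) (hm : m ≤ arr.length) :
    pvML arr.reverse target m = pvSuf arr target (arr.length - m) := by
  unfold pvML pvSuf
  apply pvOFmin_eq_of_subset
  · intro x hx
    rcases pvMem_cand.1 hx with ⟨s, e, hs, he, hc, rfl⟩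
    rw [pvPfx_reverse arr e (by omega), pvPfx_reverse arr s (by omega)] at hc
    refine pvMem_sufCand.2 ⟨arr.length - e, arr.length - s, by omega, by omega, by omega,
      by omega, ?_⟩
    congr 1
    omega
  · intro x hx
    rcases pvMem_sufCand.1 hx with ⟨s, e, hs, he, ht, hc, rfl⟩
    refine pvMem_cand.2 ⟨arr.length - e, arr.length - s, by omega, by omega, ?_, ?_⟩
    · rw [pvPfx_reverse arr (arr.length - s) (by omega),
        pvPfx_reverse arr (arr.length - e) (by omega)]
      have h1 : arr.length - (arr.length - s) = s := by omega
      have h2 : arr.length - (arr.length - e) = e := by omega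
      rw [h1, h2]
      omega
    · congr 1
      omega

-- ---------- the combine pass equals the optimum ----------
theorem pvOAdd_none_left (b : Option Int) : pvOAdd none b = none := rfl

theorem pvOAdd_none_right (a : Option Int) : pvOAdd a none = none := by
  cases a <;> rfl

theorem pvOPT_eq_combine (arr : List Int) (target : Int) :
    pvOPT arr target = pvOFmin ((List.range (arr.length + 1)).map
      (fun k => pvOAdd (pvML arr target k) (pvSuf arr target k))) := by
  unfold pvOPT
  apply pvOLe_antisymm
  · apply pvLe_oFmin
    intro x hx
    rcases List.mem_map.1 hx with ⟨k, hkm, rfl⟩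
    cases hL : pvML arr target k with
    | none => rw [pvOAdd_none_left]; exact pvOLe_none _
    | some a =>
        cases hR : pvSuf arr target k with
        | none => rw [pvOAdd_none_right]; exact pvOLe_none _
        | some b =>
            rcases pvMem_cand.1 (pvOFmin_mem hL) with ⟨s1, e1, hs1, he1, hc1, hv1⟩
            rcases pvMem_sufCand.1 (pvOFmin_mem hR) with ⟨s2, e2, hs2, he2, ht2, hc2, hv2⟩
            refine pvOLe_trans (pvOFmin_le_mem (pvMem_optList.2 ⟨s2, e2, hs2, he2, hc2, rfl⟩)) ?_
            have h1 : pvOLe (pvML arr target s2) (some a) := by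
              rw [hv1]
              exact pvOFmin_le_mem (pvMem_cand.2 ⟨s1, e1, hs1, by omega, hc1, rfl⟩)
            have h2 : pvOLe (some ((e2 : Int) - (s2 : Int))) (some b) := by
              rw [hv2]; exact pvOLe_refl _
            have := pvOAdd_mono h1 h2
            simpa [pvOAdd] using this
  · apply pvLe_oFmin
    intro x hx
    rcases pvMem_optList.1 hx with ⟨s, e, hs, he, hc, rfl⟩
    have hmem : pvOAdd (pvML arr target s) (pvSuf arr target s) ∈
        (List.range (arr.length + 1)).map
          (fun k => pvOAdd (pvML arr target k) (pvSuf arr target k)) :=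
      List.mem_map.2 ⟨s, List.mem_range.2 (by omega), rfl⟩
    refine pvOLe_trans (pvOFmin_le_mem hmem) ?_
    exact pvOAdd_mono (pvOLe_refl _)
      (pvOFmin_le_mem (pvMem_sufCand.2 ⟨s, e, hs, he, le_refl s, hc, rfl⟩))

-- ---------- B's result ----------
theorem pvB_eq_OPT (arr : List Int) (target : Int) :
    minSumOfLengths_alt arr target =
      (match pvOPT arr target with
       | none => -1
       | some v => v) := by
  have hfold : (List.range (arr.length + 1)).foldl
      (fun ans (k : Nat) => pvOMin ans
        (pvOAdd (PySem.List.pyGetD (pvBest arr target) (k : Int) none)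
                (PySem.List.pyGetD (pvBest arr.reverse target) ((arr.length : Int) - (k : Int)) none)))
      none = pvOPT arr target := by
    have hterm : ∀ k ∈ List.range (arr.length + 1),
        pvOAdd (PySem.List.pyGetD (pvBest arr target) (k : Int) none)
          (PySem.List.pyGetD (pvBest arr.reverse target) ((arr.length : Int) - (k : Int)) none) =
        pvOAdd (pvML arr target k) (pvSuf arr target k) := by
      intro k hkm
      have hk : k ≤ arr.length := by have := List.mem_range.1 hkm; omega
      have hidx : ((arr.length : Int) - (k : Int)) = ((arr.length - k : Nat) : Int) := by
        omega
      rw [hidx, PySem.List.pyGetD_natCast, PySem.List.pyGetD_natCast, pvBest_eq, pvBest_eq,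
        List.length_reverse]
      rw [PySem.List.getD_map_range _ _ _ _ (by omega),
        PySem.List.getD_map_range _ _ _ _ (by omega)]
      rw [pvML_reverse arr target (arr.length - k) (by omega)]
      congr 2
      omega
    calc (List.range (arr.length + 1)).foldl
          (fun ans (k : Nat) => pvOMin ans
            (pvOAdd (PySem.List.pyGetD (pvBest arr target) (k : Int) none)
              (PySem.List.pyGetD (pvBest arr.reverse target) ((arr.length : Int) - (k : Int)) none)))
          none
        = (List.range (arr.length + 1)).foldl
            (fun ans (k : Nat) => pvOMin ans (pvOAdd (pvML arr target k) (pvSuf arr target k))) none := by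
          exact PySem.List.foldl_congr_mem _ _ _ _ (fun acc x hx => by rw [hterm x hx])
      _ = pvOPT arr target := by
          rw [← List.foldl_map, ← pvOFmin, ← pvOPT_eq_combine]
  rw [show minSumOfLengths_alt arr target =
      (match (List.range (arr.length + 1)).foldl
        (fun ans (k : Nat) => pvOMin ans
          (pvOAdd (PySem.List.pyGetD (pvBest arr target) (k : Int) none)
            (PySem.List.pyGetD (pvBest arr.reverse target) ((arr.length : Int) - (k : Int)) none)))
        none with
       | none => (-1 : Int)
       | some v => v) from rfl, hfold]

-- ===== VERDICT (by name: the statement is the Claim_ definition above) =====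
theorem minSumOfLengths_spec : Claim_equal_minSumOfLengths := by
  intro arr target _
  unfold Spec_minSumOfLengths
  rw [pvA_eq_AN, pvAN_eq_OPT, pvB_eq_OPT]
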